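-- pv_equiv track=rewrite | github.com/Vving-JPG/Game-Master-Agent | 2workbench/feature/services/ai_assistant/executor.py | generate_create_diff
-- ===== SOURCE A (Python) =====
-- def generate_create_diff(content: str, file_path: str) -> str:
--     """生成文件创建的 diff"""
--     lines = content.split("\n")
--     diff_lines = [
--         f"--- /dev/null",
--         f"+++ {file_path}",
--     ]
--     for line in lines:
--         diff_lines.append(f"+{line}")
--     return "\n".join(diff_lines)
-- ===== SOURCE B (Python) =====
-- def generate_create_diff(content: str, file_path: str) -> str:
--     """生成文件创建的 diff"""
--     return "--- /dev/null\n+++ " + file_path + "\n+" + content.replace("\n", "\n+")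
-- ===== Notes on version B (the rewrite author's own statement) =====
-- stated objective: simpler
-- what changed: No line list and no per-line loop: the '+' prefixes are produced by one content.replace('\n', '\n+') appended to the two header lines as a single concatenation.
import Mathlib
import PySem

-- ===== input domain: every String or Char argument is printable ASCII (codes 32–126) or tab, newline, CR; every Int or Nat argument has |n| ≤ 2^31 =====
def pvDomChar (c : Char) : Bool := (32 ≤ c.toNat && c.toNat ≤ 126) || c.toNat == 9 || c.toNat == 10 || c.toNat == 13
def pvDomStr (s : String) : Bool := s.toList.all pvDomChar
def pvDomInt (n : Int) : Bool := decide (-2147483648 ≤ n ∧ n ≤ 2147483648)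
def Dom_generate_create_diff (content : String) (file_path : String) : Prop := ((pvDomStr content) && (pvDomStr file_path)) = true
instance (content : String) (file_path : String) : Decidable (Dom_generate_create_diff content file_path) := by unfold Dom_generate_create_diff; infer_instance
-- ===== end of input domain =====

-- B builds the diff by a single string replacement instead of splitting into a
-- line list and looping to prefix each line (objective: simpler).

-- ===== PORT A =====
def generate_create_diff (content : String) (file_path : String) : String :=
  let lines := PySem.Chars.splitOn content.toList "\n".toList
  let diff_lines : List (List Char) :=
    ["--- /dev/null".toList, "+++ ".toList ++ file_path.toList]
  let diff_lines := lines.foldl (fun acc line => acc ++ ['+' :: line]) diff_lines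
  String.ofList (PySem.Chars.join "\n".toList diff_lines)

-- ===== PORT B =====
def generate_create_diff_alt (content : String) (file_path : String) : String :=
  String.ofList ("--- /dev/null\n+++ ".toList ++ file_path.toList ++ "\n+".toList
    ++ PySem.Chars.replace content.toList "\n".toList "\n+".toList)

-- ===== PRECONDITION & SPEC =====
def Spec_generate_create_diff (content : String) (file_path : String) (out : String) : Prop := out = generate_create_diff_alt content file_path
instance (content : String) (file_path : String) (out : String) : Decidable (Spec_generate_create_diff content file_path out) := by unfold Spec_generate_create_diff; infer_instance

-- ===== CLAIM (what is proved, stated in full; the proofs are below) =====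
def Claim_equal_generate_create_diff : Prop := ∀ (content : String) (file_path : String), Dom_generate_create_diff content file_path → Spec_generate_create_diff content file_path (generate_create_diff content file_path)

-- ===== LEMMAS AND PROOFS =====

-- first piece / remaining pieces of content.split("\n")
def pvSp : List Char → List Char × List (List Char)
  | [] => ([], [])
  | c :: t =>
    let r := pvSp t
    if c = '\n' then ([], r.1 :: r.2) else (c :: r.1, r.2)

-- content.replace("\n", "\n+")
def pvRp : List Char → List Char
  | [] => []
  | c :: t => if c = '\n' then '\n' :: '+' :: pvRp t else c :: pvRp t

lemma pv_split_go (fuel : Nat) : ∀ (l cur : List Char) (acc : List (List Char)),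
    l.length ≤ fuel →
    PySem.Chars.splitOn.go ['\n'] fuel l cur acc
      = acc.reverse ++ (cur.reverse ++ (pvSp l).1) :: (pvSp l).2 := by
  induction fuel with
  | zero =>
    intro l cur acc h
    have hl : l = [] := List.length_eq_zero_iff.mp (Nat.le_zero.mp h)
    subst hl
    simp [PySem.Chars.splitOn.go, pvSp]
  | succ n ih =>
    intro l cur acc h
    cases l with
    | nil => simp [PySem.Chars.splitOn.go, pvSp]
    | cons c rest =>
      rw [PySem.Chars.splitOn.go]
      by_cases hc : c = '\n'
      · subst hc
        simp only [List.isPrefixOf, BEq.rfl, Bool.true_and]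
        have hdrop : List.drop ['\n'].length ('\n' :: rest) = rest := rfl
        rw [hdrop, ih rest [] (cur.reverse :: acc) (by simpa using Nat.lt_succ_iff.mp (by simpa using h))]
        simp [pvSp]
      · have hpfx : List.isPrefixOf ['\n'] (c :: rest) = false := by
          simp [List.isPrefixOf]; exact fun hne => (hc hne.symm).elim
        rw [hpfx]
        simp only [Bool.false_eq_true, if_false]
        rw [ih rest (c :: cur) acc (by simpa using Nat.lt_succ_iff.mp (by simpa using h))]
        simp [pvSp, hc]
  
lemma pv_splitOn_eq (cs : List Char) :
    PySem.Chars.splitOn cs "\n".toList = (pvSp cs).1 :: (pvSp cs).2 := by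
  show PySem.Chars.splitOn.go ['\n'] (cs.length + 1) cs [] [] = _
  rw [pv_split_go (cs.length + 1) cs [] [] (Nat.le_succ _)]
  simp

lemma pv_replace_go (fuel : Nat) : ∀ (l acc : List Char),
    l.length ≤ fuel →
    PySem.Chars.replace.go ['\n'] ['\n', '+'] fuel l acc = acc.reverse ++ pvRp l := by
  induction fuel with
  | zero =>
    intro l acc h
    have hl : l = [] := List.length_eq_zero_iff.mp (Nat.le_zero.mp h)
    subst hl
    simp [PySem.Chars.replace.go, pvRp]
  | succ n ih =>
    intro l acc h
    cases l with
    | nil => simp [PySem.Chars.replace.go, pvRp]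
    | cons c rest =>
      rw [PySem.Chars.replace.go]
      by_cases hc : c = '\n'
      · subst hc
        simp only [List.isPrefixOf, BEq.rfl, Bool.true_and]
        have hdrop : List.drop ['\n'].length ('\n' :: rest) = rest := rfl
        rw [hdrop, ih rest _ (by simpa using Nat.lt_succ_iff.mp (by simpa using h))]
        simp [pvRp]
      · have hpfx : List.isPrefixOf ['\n'] (c :: rest) = false := by
          simp [List.isPrefixOf]; exact fun hne => (hc hne.symm).elim
        rw [hpfx]
        simp only [Bool.false_eq_true, if_false]
        rw [ih rest (c :: acc) (by simpa using Nat.lt_succ_iff.mp (by simpa using h))]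
        simp [pvRp, hc]

lemma pv_replace_eq (cs : List Char) :
    PySem.Chars.replace cs "\n".toList "\n+".toList = pvRp cs := by
  show PySem.Chars.replace cs ['\n'] ['\n', '+'] = _
  rw [PySem.Chars.replace]
  simp only [List.isEmpty_cons, Bool.false_eq_true, if_false]
  exact pv_replace_go cs.length cs [] (le_refl _)

lemma pv_join_cons_head (x : Char) (p : List Char) (ps : List (List Char)) :
    PySem.Chars.join ['\n'] ((x :: p) :: ps) = x :: PySem.Chars.join ['\n'] (p :: ps) := by
  cases ps with
  | nil => simp [PySem.Chars.join_singleton]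
  | cons q qs => rw [PySem.Chars.join_cons_cons, PySem.Chars.join_cons_cons]; simp

lemma pv_core (cs : List Char) :
    PySem.Chars.join ['\n'] (('+' :: (pvSp cs).1) :: ((pvSp cs).2).map ('+' :: ·))
      = '+' :: pvRp cs := by
  induction cs with
  | nil => simp [pvSp, pvRp, PySem.Chars.join_singleton]
  | cons c t ih =>
    have hpeel : PySem.Chars.join ['\n'] ((pvSp t).1 :: ((pvSp t).2).map ('+' :: ·)) = pvRp t := by
      rw [pv_join_cons_head] at ih
      simpa using ih
    by_cases hc : c = '\n'
    · subst hc
      simp only [pvSp, pvRp, reduceIte]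
      rw [List.map_cons, PySem.Chars.join_cons_cons, pv_join_cons_head, hpeel]
      simp
    · simp only [pvSp, pvRp, if_neg hc]
      rw [pv_join_cons_head, pv_join_cons_head, hpeel]

-- ===== VERDICT (by name: the statement is the Claim_ definition above) =====
theorem generate_create_diff_spec : Claim_equal_generate_create_diff := by
  intro content file_path _
  unfold Spec_generate_create_diff generate_create_diff generate_create_diff_alt
  dsimp only
  have hn : ("\n".toList : List Char) = ['\n'] := rfl
  rw [pv_splitOn_eq, pv_replace_eq content.toList, hn,
    PySem.List.foldl_append_singleton_eq_map, List.map_cons]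
  simp only [List.cons_append, List.nil_append]
  rw [PySem.Chars.join_cons_cons, PySem.Chars.join_cons_cons, pv_core]
  have h1 : ("--- /dev/null\n+++ ".toList : List Char)
      = "--- /dev/null".toList ++ ['\n'] ++ "+++ ".toList := rfl
  have h2 : ("\n+".toList : List Char) = ['\n', '+'] := rfl
  congr 1
  simp [h1, h2, List.append_assoc]
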